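-- pv_equiv track=rewrite | github.com/pmy0721/mekey-lightning | python-sidecar/src/transcribe_service.py | _collapse_exact_repeat
-- ===== SOURCE A (Python) =====
-- def _collapse_exact_repeat(text: str) -> str:
--     compact = "".join(text.split())
--     if len(compact) % 2 != 0:
--         return text
--     half = len(compact) // 2
--     if half == 0 or compact[:half] != compact[half:]:
--         return text
--     result = []
--     seen = 0
--     for ch in text:
--         if not ch.isspace() and seen >= half:
--             continue
--         result.append(ch)
--         if not ch.isspace():
--             seen += 1
--     return "".join(result).strip()
-- ===== SOURCE B (Python) =====
-- def _collapse_exact_repeat(text: str) -> str: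
--     compact = "".join(text.split())
--     half = len(compact) // 2
--     if len(compact) % 2 != 0 or half == 0 or compact[:half] != compact[half:]:
--         return text
--     seen = 0
--     for i, ch in enumerate(text):
--         if not ch.isspace():
--             seen += 1
--             if seen == half:
--                 return text[:i + 1].strip()
--     return text  # unreachable: text has 2*half non-space characters
-- ===== Notes on version B (the rewrite author's own statement) =====
-- stated objective: simpler
-- what changed: Instead of rebuilding the string by filtering characters into a result list and counting appended non-space characters, B scans once for the index of the half-th non-space character and returns text[:i+1].strip().
import Mathlib
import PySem

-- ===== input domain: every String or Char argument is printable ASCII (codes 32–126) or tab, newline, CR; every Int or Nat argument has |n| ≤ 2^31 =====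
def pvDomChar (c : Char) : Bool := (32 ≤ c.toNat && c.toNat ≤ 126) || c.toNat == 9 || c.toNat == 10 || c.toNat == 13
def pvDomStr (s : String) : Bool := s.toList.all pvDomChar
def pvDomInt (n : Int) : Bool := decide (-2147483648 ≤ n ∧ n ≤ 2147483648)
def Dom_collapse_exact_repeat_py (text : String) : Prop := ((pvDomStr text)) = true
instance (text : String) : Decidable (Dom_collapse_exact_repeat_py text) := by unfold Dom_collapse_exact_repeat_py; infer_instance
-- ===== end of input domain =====

-- B replaces A's append-and-count reconstruction by finding the cut index of the half-th
-- non-space character and slicing; same return value, a different decomposition (objective: simpler).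

-- ===== PORT A =====
-- the for-loop of A as a foldl over the same state (result, seen); `half` is a parameter
def pvAStep (half : Nat) (st : List Char × Nat) (ch : Char) : List Char × Nat :=
  if !PySem.Chars.isspace ch && half ≤ st.2 then st   -- `continue`
  else (st.1 ++ [ch], if !PySem.Chars.isspace ch then st.2 + 1 else st.2)

-- A on the character list (PySem string ops are defined on List Char)
def pvACore (cs : List Char) : List Char :=
  let compact := PySem.Chars.join [] (PySem.Chars.split₀ cs)   -- "".join(text.split())
  if compact.length % 2 ≠ 0 then cs
  else
    let half := compact.length / 2   -- Python `//` on a nonnegative int = Nat division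
    if half = 0 ∨ PySem.List.slice compact none (some (half : Int)) ≠ PySem.List.slice compact (some (half : Int)) none then cs
    else PySem.Chars.strip (List.foldl (pvAStep half) ([], 0) cs).1

def collapse_exact_repeat_py (text : String) : String := String.ofList (pvACore text.toList)

-- ===== PORT B =====
-- scan for the index of the half-th non-space character (B's enumerate loop)
def pvFindCut (half : Nat) : List Char → Nat → Nat → Option Nat
  | [], _, _ => none
  | c :: rest, i, seen =>
      if !PySem.Chars.isspace c then
        if seen + 1 = half then some i else pvFindCut half rest (i + 1) (seen + 1)
      else pvFindCut half rest (i + 1) seen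

def pvBCore (cs : List Char) : List Char :=
  let compact := PySem.Chars.join [] (PySem.Chars.split₀ cs)
  let half := compact.length / 2
  if compact.length % 2 ≠ 0 ∨ half = 0 ∨
      PySem.List.slice compact none (some (half : Int)) ≠ PySem.List.slice compact (some (half : Int)) none then cs
  else
    match pvFindCut half cs 0 0 with
    | some i => PySem.Chars.strip (PySem.List.slice cs none (some ((i : Int) + 1)))   -- text[:i+1].strip()
    | none => cs   -- unreachable

def collapse_exact_repeat_py_alt (text : String) : String := String.ofList (pvBCore text.toList)

-- ===== PRECONDITION & SPEC =====
def Spec_collapse_exact_repeat_py (text : String) (out : String) : Prop := out = collapse_exact_repeat_py_alt text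
instance (text : String) (out : String) : Decidable (Spec_collapse_exact_repeat_py text out) := by unfold Spec_collapse_exact_repeat_py; infer_instance

-- ===== CLAIM (what is proved, stated in full; the proofs are below) =====
def Claim_equal_collapse_exact_repeat_py : Prop := ∀ (text : String), Dom_collapse_exact_repeat_py text → Spec_collapse_exact_repeat_py text (collapse_exact_repeat_py text)

-- ===== LEMMAS AND PROOFS =====

-- A's loop without the accumulator
def pvLoopA (half : Nat) : List Char → Nat → List Char
  | [], _ => []
  | c :: rest, seen =>
      if !PySem.Chars.isspace c && half ≤ seen then pvLoopA half rest seen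
      else c :: pvLoopA half rest (if !PySem.Chars.isspace c then seen + 1 else seen)

theorem pvFoldA_eq (half : Nat) (cs : List Char) : ∀ (r : List Char) (s : Nat),
    (List.foldl (pvAStep half) (r, s) cs).1 = r ++ pvLoopA half cs s := by
  induction cs with
  | nil => intro r s; simp [pvLoopA]
  | cons c rest ih =>
      intro r s
      simp only [List.foldl_cons, pvAStep, pvLoopA]
      by_cases h : (!PySem.Chars.isspace c && half ≤ s) = true
      · simp [h, ih]
      · simp only [h, if_neg, Bool.not_eq_true] at *
        simp [ih]

theorem pvLoopA_sat (half : Nat) (cs : List Char) : ∀ s, half ≤ s →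
    pvLoopA half cs s = cs.filter PySem.Chars.isspace := by
  induction cs with
  | nil => intro s _; simp [pvLoopA]
  | cons c rest ih =>
      intro s hs
      by_cases h : PySem.Chars.isspace c = true
      · simp [pvLoopA, h, ih s hs, List.filter]
      · simp [pvLoopA, h, hs, ih s hs, List.filter]

-- the central invariant: while seen < half and enough non-space chars remain,
-- A's loop keeps the prefix up to the cut and only whitespace beyond it, and B finds that cut.
theorem pvMain (half : Nat) (cs : List Char) : ∀ (i seen : Nat), seen < half →
    half - seen ≤ cs.countP (fun c => !PySem.Chars.isspace c) →
    ∃ j, pvFindCut half cs i seen = some (i + j) ∧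
      pvLoopA half cs seen = cs.take (j + 1) ++ (cs.drop (j + 1)).filter PySem.Chars.isspace ∧
      ∃ d ∈ cs.take (j + 1), PySem.Chars.isspace d = false := by
  induction cs with
  | nil =>
      intro i seen h1 h2
      simp at h2; omega
  | cons c rest ih =>
      intro i seen h1 h2
      by_cases h : PySem.Chars.isspace c = true
      · have h2' : half - seen ≤ rest.countP (fun c => !PySem.Chars.isspace c) := by
          simpa [List.countP_cons, h] using h2
        obtain ⟨j, hf, hl, hd⟩ := ih (i + 1) seen h1 h2'
        refine ⟨j + 1, ?_, ?_, ?_⟩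
        · simp [pvFindCut, h, hf]; omega
        · simp [pvLoopA, h, Nat.not_le.mpr h1, hl]
        · obtain ⟨d, hdm, hds⟩ := hd
          exact ⟨d, by simp [List.mem_cons]; right; exact hdm, hds⟩
      · by_cases he : seen + 1 = half
        · refine ⟨0, ?_, ?_, ?_⟩
          · simp [pvFindCut, h, he]
          · have hsat := pvLoopA_sat half rest (seen + 1) (by omega)
            simp [pvLoopA, h, Nat.not_le.mpr h1]
            exact hsat
          · exact ⟨c, by simp, by simpa using h⟩
        · have h2' : half - (seen + 1) ≤ rest.countP (fun c => !PySem.Chars.isspace c) := by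
            simp [h] at h2 ⊢; omega
          obtain ⟨j, hf, hl, hd⟩ := ih (i + 1) (seen + 1) (by omega) h2'
          refine ⟨j + 1, ?_, ?_, ?_⟩
          · simp [pvFindCut, h, he, hf]; omega
          · simp [pvLoopA, h, Nat.not_le.mpr h1, hl]
          · obtain ⟨d, hdm, hds⟩ := hd
            exact ⟨d, by simp [List.mem_cons]; right; exact hdm, hds⟩

-- "".join(s.split()) is s with all whitespace removed
theorem pvFlatten_intersperse_nil (l : List (List Char)) :
    (l.intersperse ([] : List Char)).flatten = l.flatten := by
  induction l with
  | nil => rfl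
  | cons x xs ih =>
      cases xs with
      | nil => rfl
      | cons y ys => simp [List.intersperse] at ih ⊢; simpa using ih

theorem pvGoFlatten (cs : List Char) : ∀ (cur : List Char) (acc : List (List Char)),
    (PySem.Chars.split₀.go cs cur acc).flatten =
      acc.reverse.flatten ++ cur.reverse ++ cs.filter (fun c => !PySem.Chars.isspace c) := by
  induction cs with
  | nil =>
      intro cur acc
      by_cases h : cur.isEmpty = true
      · simp [PySem.Chars.split₀.go, List.isEmpty_iff.mp h]
      · simp [PySem.Chars.split₀.go, h]
  | cons c rest ih =>
      intro cur acc
      by_cases h : PySem.Chars.isspace c = true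
      · by_cases hc : cur.isEmpty = true
        · simp [PySem.Chars.split₀.go, h, ih, List.isEmpty_iff.mp hc]
        · simp [PySem.Chars.split₀.go, h, hc, ih]
      · simp [PySem.Chars.split₀.go, h, ih]

-- "".join(s.split()) is s with all whitespace removed
theorem pvJoinSplit (cs : List Char) :
    PySem.Chars.join [] (PySem.Chars.split₀ cs) = cs.filter (fun c => !PySem.Chars.isspace c) := by
  simpa [PySem.Chars.join, PySem.Chars.split₀, List.intercalate, pvFlatten_intersperse_nil]
    using pvGoFlatten cs [] []

theorem pvRstrip_append_space (p w : List Char) (hw : ∀ c ∈ w, PySem.Chars.isspace c = true) :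
    PySem.Chars.rstrip (p ++ w) = PySem.Chars.rstrip p := by
  have hdw : w.reverse.dropWhile PySem.Chars.isspace = [] := by
    rw [List.dropWhile_eq_nil_iff]
    intro x hx; exact hw x (List.mem_reverse.mp hx)
  simp [PySem.Chars.rstrip, List.dropWhile_append, hdw]

theorem pvStrip_append_space (p w : List Char) (hw : ∀ c ∈ w, PySem.Chars.isspace c = true)
    (hp : ∃ c ∈ p, PySem.Chars.isspace c = false) :
    PySem.Chars.strip (p ++ w) = PySem.Chars.strip p := by
  obtain ⟨d, hdm, hds⟩ := hp
  have hne : p.dropWhile PySem.Chars.isspace ≠ [] := by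
    rw [Ne, List.dropWhile_eq_nil_iff]
    intro hall
    exact absurd (hall d hdm) (by simp [hds])
  have hls : PySem.Chars.lstrip (p ++ w) = PySem.Chars.lstrip p ++ w := by
    simp [PySem.Chars.lstrip, List.dropWhile_append, List.isEmpty_iff, hne]
  rw [PySem.Chars.strip, hls, pvRstrip_append_space _ _ hw, PySem.Chars.strip]

-- ===== VERDICT (by name: the statement is the Claim_ definition above) =====
theorem pvCore_eq (cs : List Char) : pvACore cs = pvBCore cs := by
  unfold pvACore pvBCore
  simp only [pvJoinSplit]
  set compact := cs.filter (fun c => !PySem.Chars.isspace c) with hcomp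
  by_cases h1 : compact.length % 2 ≠ 0
  · simp [h1]
  · by_cases h2 : compact.length / 2 = 0 ∨
        PySem.List.slice compact none (some ((compact.length / 2 : Nat) : Int)) ≠
          PySem.List.slice compact (some ((compact.length / 2 : Nat) : Int)) none
    · simp only [if_neg h1, if_pos h2]
      rw [if_pos (Or.inr h2)]
    · simp only [if_neg h1, if_neg h2]
      rw [if_neg (fun hor => hor.elim h1 h2)]
      set half := compact.length / 2 with hhalf
      have h2a : half ≠ 0 := (not_or.mp h2).1
      have hk : compact.length = cs.countP (fun c => !PySem.Chars.isspace c) := by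
        simp [hcomp, List.countP_eq_length_filter]
      have hle : half ≤ cs.countP (fun c => !PySem.Chars.isspace c) := by
        rw [← hk, hhalf]; omega
      obtain ⟨j, hf, hl, hd⟩ := pvMain half cs 0 0 (Nat.pos_of_ne_zero h2a) (by simpa using hle)
      rw [pvFoldA_eq half cs [] 0, hl]
      simp only [Nat.zero_add] at hf
      rw [hf]
      show _ = PySem.Chars.strip (PySem.List.slice cs none (some ((j : Int) + 1)))
      have : ((j : Int) + 1) = (((j + 1 : Nat)) : Int) := by push_cast; ring
      rw [this, PySem.List.slice_to cs (by positivity)]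
      simp only [Int.toNat_natCast, List.nil_append]
      rw [pvStrip_append_space _ _ (fun c hc => (List.mem_filter.mp hc).2) hd]

theorem collapse_exact_repeat_py_spec : Claim_equal_collapse_exact_repeat_py := by
  intro text _
  unfold Spec_collapse_exact_repeat_py collapse_exact_repeat_py collapse_exact_repeat_py_alt
  rw [pvCore_eq]
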